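-- pv_equiv track=rewrite | github.com/maichcornejo/planeargas | backend/app/main/python/_3_1_normalizar_vectores.py | empalmar_vectores
-- ===== SOURCE A (Python) =====
-- def misma_direccion_y_sentido(v1, v2):
--     """Verifica si dos vectores están en la misma dirección y tienen el mismo sentido."""
--     (x1, y1), (x2, y2) = v1
--     (x3, y3), (x4, y4) = v2
--
--     # Si están en el eje Y (X constante) y tienen el mismo sentido
--     if x1 == x2 == x3 == x4 and ((y2 > y1 and y4 > y3) or (y2 < y1 and y4 < y3)):
--         return True
--     # Si están en el eje X (Y constante) y tienen el mismo sentido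
--     if y1 == y2 == y3 == y4 and ((x2 > x1 and x4 > x3) or (x2 < x1 and x4 < x3)):
--         return True
--
--     return False
--
-- def empalmar_vectores(vectores, inicio_indice=0):
--     # Lista para almacenar los vectores empalmados
--     vectores_modificados = []
--
--     # Empezamos desde el índice especificado (por defecto, desde el inicio)
--     i = inicio_indice
--     while i < len(vectores):
--         inicio, fin = vectores[i]
--
--         # Verificar si el siguiente vector tiene un inicio que coincide con el fin del vector actual
--         # y si están en la misma dirección y sentido
--         while i + 1 < len(vectores) and fin == vectores[i + 1][0] and misma_direccion_y_sentido((inicio, fin), vectores[i + 1]):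
--             # Si coinciden, extendemos el vector actual
--             fin = vectores[i + 1][1]
--             i += 1
--
--         # Agregar el vector empalmado o el vector sin cambios
--         vectores_modificados.append((inicio, fin))
--         i += 1
--
--     return vectores_modificados
-- ===== SOURCE B (Python) =====
-- def misma_direccion_y_sentido(v1, v2):
--     """Verifica si dos vectores estan en la misma direccion y tienen el mismo sentido."""
--     (x1, y1), (x2, y2) = v1
--     (x3, y3), (x4, y4) = v2
--     if x1 == x2 == x3 == x4 and ((y2 > y1 and y4 > y3) or (y2 < y1 and y4 < y3)):
--         return True
--     if y1 == y2 == y3 == y4 and ((x2 > x1 and x4 > x3) or (x2 < x1 and x4 < x3)):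
--         return True
--     return False
--
-- def empalmar_vectores(vectores, inicio_indice=0):
--     # Right-to-left pass building the output back-to-front.  The mergeability test is
--     # applied to ADJACENT ORIGINAL vectors vs[i], vs[i+1] (never to an accumulated run):
--     # a merged run chains with the next vector exactly when its last original segment
--     # does, because all segments of a run are collinear with the same sense.
--     vs = vectores[inicio_indice:]
--     res = []  # merged vectors, in reverse order
--     for i in range(len(vs) - 1, -1, -1):
--         v = vs[i]
--         if res and v[1] == vs[i + 1][0] and misma_direccion_y_sentido(v, vs[i + 1]):
--             # v chains with its right neighbour: extend the start of the latest run
--             res[-1] = (v[0], res[-1][1])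
--         else:
--             res.append(v)
--     res.reverse()
--     return res
-- ===== Notes on version B (the rewrite author's own statement) =====
-- stated objective: alternative
-- what changed: A's forward index loop with a nested while that grows an accumulated run and tests misma_direccion_y_sentido on (accumulated run, next) is replaced by a right-to-left pass that builds the output back-to-front and tests only ADJACENT ORIGINAL vectors vs[i], vs[i+1], extending the start of the latest emitted run; correctness rests on the proved geometric fact that a merged run chains with the next vector iff its last original segment does.
-- intended difference: For a negative start index with -len <= inicio_indice < 0 A wraps via Python negative indexing and processes the last |inicio_indice| vectors followed by the whole list again (duplicating vectors), while B processes only the slice vectores[inicio_indice:], which is the intended meaning of a start index. — e.g. on empalmar_vectores([((0, 0), (1, 0))], -1): A returns [((0, 0), (1, 0)), ((0, 0), (1, 0))], B returns [((0, 0), (1, 0))]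
import Mathlib
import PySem

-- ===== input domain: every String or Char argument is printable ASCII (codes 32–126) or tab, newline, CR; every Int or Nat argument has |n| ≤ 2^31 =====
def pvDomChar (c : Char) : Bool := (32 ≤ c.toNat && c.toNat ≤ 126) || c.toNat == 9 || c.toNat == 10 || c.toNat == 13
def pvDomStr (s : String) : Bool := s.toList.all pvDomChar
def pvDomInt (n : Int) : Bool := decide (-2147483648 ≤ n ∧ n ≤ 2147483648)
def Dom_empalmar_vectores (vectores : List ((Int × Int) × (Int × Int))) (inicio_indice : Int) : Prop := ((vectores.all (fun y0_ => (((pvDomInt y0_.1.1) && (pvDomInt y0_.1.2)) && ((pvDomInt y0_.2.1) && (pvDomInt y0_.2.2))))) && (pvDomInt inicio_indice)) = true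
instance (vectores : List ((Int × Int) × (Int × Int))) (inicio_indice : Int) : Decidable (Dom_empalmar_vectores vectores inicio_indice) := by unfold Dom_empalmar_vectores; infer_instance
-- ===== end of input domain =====

-- B replaces A's forward nested-while accumulated-run merge by a right-to-left pass that
-- builds the output back-to-front and tests only adjacent original vectors (objective:
-- alternative); A = B proved for inicio_indice ≥ 0, intended difference D_ for negative
-- start indices (A wraps via negative indexing).

-- ===== PORT A =====

-- misma_direccion_y_sentido, shared helper (identical in Source A and Source B)
def misma_dir (v1 v2 : (Int × Int) × (Int × Int)) : Bool :=
  let ((x1, y1), (x2, y2)) := v1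
  let ((x3, y3), (x4, y4)) := v2
  if (x1 == x2 && x2 == x3 && x3 == x4) &&
     ((decide (y2 > y1) && decide (y4 > y3)) || (decide (y2 < y1) && decide (y4 < y3))) then true
  else if (y1 == y2 && y2 == y3 && y3 == y4) &&
     ((decide (x2 > x1) && decide (x4 > x3)) || (decide (x2 < x1) && decide (x4 < x3))) then true
  else false

-- inner while loop of A: extends fin while the next vector chains; returns (i, fin).
-- The fuel argument only makes the loop total (2*len+1 always suffices; the loop index
-- strictly increases and is bounded by len): it never changes the computed value.
def innerA (v : List ((Int × Int) × (Int × Int))) (inicio : Int × Int) :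
    Nat → Int → (Int × Int) → Int × (Int × Int)
  | 0, i, fin => (i, fin)
  | fuel + 1, i, fin =>
    if i + 1 < (v.length : Int) then
      match PySem.List.pyGet? v (i + 1) with
      | none => (i, fin)   -- IndexError in Python (negative wrap below -len); outside Pre_
      | some w =>
        if fin == w.1 && misma_dir (inicio, fin) w then innerA v inicio fuel (i + 1) w.2
        else (i, fin)
    else (i, fin)

-- outer while loop of A (same fuel discipline)
def loopA (v : List ((Int × Int) × (Int × Int))) :
    Nat → List ((Int × Int) × (Int × Int)) → Int → List ((Int × Int) × (Int × Int))
  | 0, acc, _ => acc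
  | fuel + 1, acc, i =>
    if i < (v.length : Int) then
      match PySem.List.pyGet? v i with
      | none => acc   -- IndexError in Python (negative wrap below -len); outside Pre_
      | some c =>
        let r := innerA v c.1 (2 * v.length + 1) i c.2
        loopA v fuel (acc ++ [(c.1, r.2)]) (r.1 + 1)
    else acc

def empalmar_vectores (vectores : List ((Int × Int) × (Int × Int))) (inicio_indice : Int) :
    List ((Int × Int) × (Int × Int)) :=
  loopA vectores (2 * vectores.length + 1) [] inicio_indice

-- ===== PORT B =====

-- Source B's right-to-left loop as structural recursion on the suffix: Python keeps `res`
-- in reverse order and reverses it before returning, so this port's list is Python's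
-- res reversed throughout — res[-1] is the head, res.append(v) is cons, and the final
-- res.reverse() is the identity here; the comparisons are the same, in the same order.
def fusionarB : List ((Int × Int) × (Int × Int)) → List ((Int × Int) × (Int × Int))
  | [] => []
  | v :: rest =>
    match fusionarB rest, rest with
    | r :: rs, w :: _ =>
      -- res nonempty: v[1] == vs[i+1][0] and misma_direccion_y_sentido(v, vs[i+1])
      if v.2 == w.1 && misma_dir v w then (v.1, r.2) :: rs else v :: r :: rs
    | res, _ => v :: res

def empalmar_vectores_alt (vectores : List ((Int × Int) × (Int × Int))) (inicio_indice : Int) :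
    List ((Int × Int) × (Int × Int)) :=
  fusionarB (PySem.List.slice vectores (some inicio_indice) none)

-- ===== PRECONDITION & SPEC =====

-- Pre_ excludes exactly the inputs where A raises IndexError: inicio_indice below -len(vectores).
def Pre_empalmar_vectores (vectores : List ((Int × Int) × (Int × Int))) (inicio_indice : Int) : Prop :=
  -(vectores.length : Int) ≤ inicio_indice
instance (vectores : List ((Int × Int) × (Int × Int))) (inicio_indice : Int) :
    Decidable (Pre_empalmar_vectores vectores inicio_indice) := by
  unfold Pre_empalmar_vectores; infer_instance

def pvWitness_empalmar_vectores : (List ((Int × Int) × (Int × Int))) × Int :=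
  ([((0, 0), (1, 0)), ((1, 0), (2, 0))], 0)

-- On a negative start index with -len ≤ inicio_indice < 0 A wraps Python-style: it processes the
-- last |inicio_indice| vectors and then the WHOLE list again, duplicating every vector; B processes
-- only the slice vectores[inicio_indice:], which is the intended meaning of a start index.
def D_empalmar_vectores (vectores : List ((Int × Int) × (Int × Int))) (inicio_indice : Int) : Prop :=
  -(vectores.length : Int) ≤ inicio_indice ∧ inicio_indice < 0
instance (vectores : List ((Int × Int) × (Int × Int))) (inicio_indice : Int) :
    Decidable (D_empalmar_vectores vectores inicio_indice) := by
  unfold D_empalmar_vectores; infer_instance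

def Spec_empalmar_vectores (vectores : List ((Int × Int) × (Int × Int))) (inicio_indice : Int)
    (out : List ((Int × Int) × (Int × Int))) : Prop :=
  ¬ D_empalmar_vectores vectores inicio_indice → out = empalmar_vectores_alt vectores inicio_indice
instance (vectores : List ((Int × Int) × (Int × Int))) (inicio_indice : Int)
    (out : List ((Int × Int) × (Int × Int))) :
    Decidable (Spec_empalmar_vectores vectores inicio_indice out) := by
  unfold Spec_empalmar_vectores; infer_instance

def pvDiffWitness_empalmar_vectores : (List ((Int × Int) × (Int × Int))) × Int :=
  ([((0, 0), (1, 0))], -1)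
def pvDiffWitnessOut_empalmar_vectores :
    (List ((Int × Int) × (Int × Int))) × (List ((Int × Int) × (Int × Int))) :=
  ([((0, 0), (1, 0)), ((0, 0), (1, 0))], [((0, 0), (1, 0))])

-- ===== CLAIM =====
def Claim_unchanged_empalmar_vectores : Prop := ∀ (vectores : List ((Int × Int) × (Int × Int))) (inicio_indice : Int), Dom_empalmar_vectores vectores inicio_indice → Pre_empalmar_vectores vectores inicio_indice → Spec_empalmar_vectores vectores inicio_indice (empalmar_vectores vectores inicio_indice)
def Claim_changed_empalmar_vectores : Prop := Dom_empalmar_vectores (pvDiffWitness_empalmar_vectores.1) (pvDiffWitness_empalmar_vectores.2) ∧ Pre_empalmar_vectores (pvDiffWitness_empalmar_vectores.1) (pvDiffWitness_empalmar_vectores.2) ∧ D_empalmar_vectores (pvDiffWitness_empalmar_vectores.1) (pvDiffWitness_empalmar_vectores.2) ∧ empalmar_vectores (pvDiffWitness_empalmar_vectores.1) (pvDiffWitness_empalmar_vectores.2) = pvDiffWitnessOut_empalmar_vectores.1 ∧ empalmar_vectores_alt (pvDiffWitness_empalmar_vectores.1) (pvDiffWitness_empalmar_vectores.2) = pvDiffWitnessOut_empalmar_vectores.2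 ∧ pvDiffWitnessOut_empalmar_vectores.1 ≠ pvDiffWitnessOut_empalmar_vectores.2

-- ===== LEMMAS AND PROOFS =====

-- the mergeability test on a pair of vectors, as A applies it
def chainP (a b : (Int × Int) × (Int × Int)) : Bool := a.2 == b.1 && misma_dir a b

-- A's run merge in canonical form: carry the current accumulated (inicio, fin)
def mergeRef (cur : (Int × Int) × (Int × Int)) :
    List ((Int × Int) × (Int × Int)) → List ((Int × Int) × (Int × Int))
  | [] => [cur]
  | w :: t => if chainP cur w then mergeRef (cur.1, w.2) t
              else cur :: mergeRef w t

def mergeAll : List ((Int × Int) × (Int × Int)) → List ((Int × Int) × (Int × Int))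
  | [] => []
  | c :: t => mergeRef c t

theorem bool_ext {a b : Bool} (h : a = true ↔ b = true) : a = b := by
  cases a <;> cases b <;> simp_all

theorem misma_dir_true_iff (x1 y1 x2 y2 x3 y3 x4 y4 : Int) :
    misma_dir ((x1, y1), (x2, y2)) ((x3, y3), (x4, y4)) = true ↔
      (x1 = x2 ∧ x2 = x3 ∧ x3 = x4 ∧ ((y2 > y1 ∧ y4 > y3) ∨ (y2 < y1 ∧ y4 < y3))) ∨
      (y1 = y2 ∧ y2 = y3 ∧ y3 = y4 ∧ ((x2 > x1 ∧ x4 > x3) ∨ (x2 < x1 ∧ x4 < x3))) := by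
  simp only [misma_dir, Bool.and_eq_true, Bool.or_eq_true, beq_iff_eq, decide_eq_true_eq]
  split_ifs with h1 h2 <;> simp <;> omega

-- geometric key: once v chains with w, the merged run (v.1, w.2) chains with any u iff w does
theorem chainP_extend (v w u : (Int × Int) × (Int × Int)) (h : chainP v w = true) :
    chainP (v.1, w.2) u = chainP w u := by
  obtain ⟨⟨x1, y1⟩, ⟨x2, y2⟩⟩ := v
  obtain ⟨⟨x3, y3⟩, ⟨x4, y4⟩⟩ := w
  obtain ⟨⟨x5, y5⟩, ⟨x6, y6⟩⟩ := u
  apply bool_ext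
  simp only [chainP, Bool.and_eq_true, beq_iff_eq, Prod.mk.injEq] at h ⊢
  obtain ⟨⟨hx, hy⟩, hd⟩ := h
  rw [misma_dir_true_iff] at hd
  rw [misma_dir_true_iff, misma_dir_true_iff]
  omega

-- two runs with equal ends and equal chaining behaviour merge the same tail, differing
-- only in the recorded start point
theorem mergeRef_congr (l : List ((Int × Int) × (Int × Int))) :
    ∀ c w : (Int × Int) × (Int × Int), (∀ u, chainP c u = chainP w u) → c.2 = w.2 →
    ∃ z rs, mergeRef w l = (w.1, z) :: rs ∧ mergeRef c l = (c.1, z) :: rs := by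
  induction l with
  | nil =>
    intro c w _ h2
    refine ⟨w.2, [], by simp [mergeRef], ?_⟩
    rw [mergeRef, ← h2]
  | cons u t ih =>
    intro c w h1 h2
    by_cases hc : chainP w u = true
    · have hcc : chainP c u = true := (h1 u).trans hc
      obtain ⟨z, rs, hw, hcr⟩ := ih (c.1, u.2) (w.1, u.2)
        (fun s => (chainP_extend c u s hcc).trans (chainP_extend w u s hc).symm) rfl
      refine ⟨z, rs, ?_, ?_⟩
      · rw [mergeRef, if_pos hc]; exact hw
      · rw [mergeRef, if_pos hcc]; exact hcr
    · have hccn : ¬ chainP c u = true := by rw [h1 u]; exact hc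
      refine ⟨c.2, mergeRef u t, ?_, ?_⟩
      · rw [mergeRef, if_neg hc, h2]
      · rw [mergeRef, if_neg hccn]

-- B's back-to-front construction computes A's canonical merge
theorem fusionarB_eq (l : List ((Int × Int) × (Int × Int))) : fusionarB l = mergeAll l := by
  induction l with
  | nil => simp [fusionarB, mergeAll]
  | cons v rest ih =>
    cases rest with
    | nil => simp [fusionarB, mergeAll, mergeRef]
    | cons w t =>
      obtain ⟨z, rs, hw, -⟩ := mergeRef_congr t w w (fun _ => rfl) rfl
      have hrest : fusionarB (w :: t) = (w.1, z) :: rs := by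
        rw [ih]; simpa [mergeAll] using hw
      have hstep : fusionarB (v :: w :: t) =
          if v.2 == w.1 && misma_dir v w then (v.1, z) :: rs else v :: (w.1, z) :: rs := by
        have h0 : fusionarB (v :: w :: t) =
            (match fusionarB (w :: t), w :: t with
             | r :: rs, w' :: _ =>
               if v.2 == w'.1 && misma_dir v w' then (v.1, r.2) :: rs else v :: r :: rs
             | res, _ => v :: res) := rfl
        rw [h0, hrest]
      rw [hstep]
      by_cases hc : chainP v w = true
      · obtain ⟨z', rs', hw', hc'⟩ := mergeRef_congr t (v.1, w.2) w
          (fun s => chainP_extend v w s hc) rfl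
        have hzz : z = z' ∧ rs = rs' := by
          have h := hw.symm.trans hw'
          simpa [List.cons.injEq, Prod.mk.injEq] using h
        rw [if_pos (show (v.2 == w.1 && misma_dir v w) = true from hc)]
        simp only [mergeAll]
        rw [mergeRef, if_pos hc, hc', hzz.1, hzz.2]
      · have hcb : ¬ (v.2 == w.1 && misma_dir v w) = true := hc
        rw [if_neg hcb]
        simp only [mergeAll]
        rw [mergeRef, if_neg hc, hw]

theorem innerA_le (v : List ((Int × Int) × (Int × Int))) (inicio : Int × Int) :
    ∀ (fuel : Nat) (i : Int) (fin : Int × Int), i ≤ (innerA v inicio fuel i fin).1 := by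
  intro fuel
  induction fuel with
  | zero => intro i fin; simp [innerA]
  | succ fuel ih =>
    intro i fin
    rw [innerA]
    split
    · cases hget : PySem.List.pyGet? v (i + 1) with
      | none => simp
      | some w =>
        simp only
        split
        · have := ih (i + 1) w.2; omega
        · simp
    · simp

theorem innerA_spec (v : List ((Int × Int) × (Int × Int))) (inicio : Int × Int) :
    ∀ (fuel : Nat) (i : Int) (fin : Int × Int), 0 ≤ i → i < (v.length : Int) →
    (v.length : Int) - 1 - i ≤ (fuel : Int) →
    (innerA v inicio fuel i fin).1 < (v.length : Int) ∧ 0 ≤ (innerA v inicio fuel i fin).1 ∧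
    mergeRef (inicio, fin) (v.drop (i.toNat + 1)) =
      (inicio, (innerA v inicio fuel i fin).2) ::
        mergeAll (v.drop ((innerA v inicio fuel i fin).1.toNat + 1)) := by
  intro fuel
  induction fuel with
  | zero =>
    intro i fin h0 hn hf
    have hi : i = (v.length : Int) - 1 := by push_cast at hf ⊢; omega
    have hdrop : v.drop (i.toNat + 1) = [] := List.drop_eq_nil_of_le (by omega)
    rw [innerA, hdrop]
    exact ⟨hn, h0, by simp [mergeRef, mergeAll]⟩
  | succ fuel ih =>
    intro i fin h0 hn hf
    rw [innerA]
    by_cases h : i + 1 < (v.length : Int)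
    · rw [if_pos h]
      have hget : PySem.List.pyGet? v (i + 1) = some v[(i + 1).toNat] :=
        PySem.List.pyGet?_eq_some_getElem v (by omega) (by exact_mod_cast h)
      rw [hget]
      simp only
      by_cases hc : (fin == v[(i + 1).toNat].1 && misma_dir (inicio, fin) v[(i + 1).toNat]) = true
      · rw [if_pos hc]
        obtain ⟨h1, h2, h3⟩ := ih (i + 1) v[(i + 1).toNat].2 (by omega) (by exact_mod_cast h)
          (by push_cast at hf ⊢; omega)
        refine ⟨h1, h2, ?_⟩
        have hd1 : i.toNat + 1 = (i + 1).toNat := by omega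
        rw [hd1, List.drop_eq_getElem_cons (by omega), mergeRef]
        rw [if_pos (show chainP (inicio, fin) v[(i + 1).toNat] = true from hc)]
        exact h3
      · rw [if_neg hc]
        refine ⟨hn, h0, ?_⟩
        have hd1 : i.toNat + 1 = (i + 1).toNat := by omega
        rw [hd1, List.drop_eq_getElem_cons (by omega), mergeRef]
        have hcc : chainP (inicio, fin) v[(i + 1).toNat] = false := by
          simpa [chainP] using hc
        simp only [hcc, Bool.false_eq_true, if_false, mergeAll]
    · rw [if_neg h]
      refine ⟨hn, h0, ?_⟩
      have hdrop : v.drop (i.toNat + 1) = [] := List.drop_eq_nil_of_le (by omega)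
      rw [hdrop]
      simp only [mergeRef, mergeAll]

theorem loopA_spec (v : List ((Int × Int) × (Int × Int))) :
    ∀ (fuel : Nat) (acc : List ((Int × Int) × (Int × Int))) (i : Int), 0 ≤ i →
    (v.length : Int) - i ≤ (fuel : Int) →
    loopA v fuel acc i = acc ++ mergeAll (v.drop i.toNat) := by
  intro fuel
  induction fuel with
  | zero =>
    intro acc i h0 hf
    have hdrop : v.drop i.toNat = [] := List.drop_eq_nil_of_le (by push_cast at hf; omega)
    simp [loopA, hdrop, mergeAll]
  | succ fuel ih =>
    intro acc i h0 hf
    rw [loopA]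
    by_cases hn : i < (v.length : Int)
    · rw [if_pos hn]
      have hget : PySem.List.pyGet? v i = some v[i.toNat] :=
        PySem.List.pyGet?_eq_some_getElem v h0 (by exact_mod_cast hn)
      rw [hget]
      simp only
      obtain ⟨h1, h2, h3⟩ := innerA_spec v (v[i.toNat]).1 (2 * v.length + 1) i (v[i.toNat]).2 h0 hn
        (by push_cast; omega)
      simp only [Prod.mk.eta] at h3
      set r := innerA v (v[i.toNat]).1 (2 * v.length + 1) i (v[i.toNat]).2 with hr
      have hle : i ≤ r.1 := innerA_le v (v[i.toNat]).1 (2 * v.length + 1) i (v[i.toNat]).2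
      rw [ih (acc ++ [((v[i.toNat]).1, r.2)]) (r.1 + 1) (by omega) (by push_cast at hf ⊢; omega)]
      have ht : (r.1 + 1).toNat = r.1.toNat + 1 := by omega
      rw [ht]
      have hdrop : v.drop i.toNat = v[i.toNat] :: v.drop (i.toNat + 1) :=
        List.drop_eq_getElem_cons (by omega)
      conv_rhs => rw [hdrop]
      simp only [mergeAll]
      rw [h3]
      simp
      rw [mergeAll.eq_def]
    · rw [if_neg hn]
      have hdrop : v.drop i.toNat = [] := List.drop_eq_nil_of_le (by omega)
      rw [hdrop]
      simp only [mergeAll, List.append_nil]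

-- ===== VERDICT =====
theorem empalmar_vectores_spec : Claim_unchanged_empalmar_vectores := by
  intro v i _ hpre hD
  unfold Pre_empalmar_vectores at hpre
  unfold D_empalmar_vectores at hD
  have h0 : 0 ≤ i := by omega
  unfold empalmar_vectores empalmar_vectores_alt
  have hs : PySem.List.slice v (some i) none = v.drop i.toNat := by
    conv_lhs => rw [show i = ((i.toNat : Nat) : Int) from by omega]
    rw [PySem.List.slice_from_natCast]
  rw [hs, fusionarB_eq, loopA_spec v (2 * v.length + 1) [] i h0 (by push_cast; omega), List.nil_append]

theorem empalmar_vectores_changed : Claim_changed_empalmar_vectores := by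
  unfold Claim_changed_empalmar_vectores
  refine ⟨by decide, by decide, by decide, ?_, by decide, by decide⟩
  simp only [pvDiffWitness_empalmar_vectores, pvDiffWitnessOut_empalmar_vectores]
  rw [empalmar_vectores]
  rw [loopA]
  norm_num [PySem.List.pyGet?, PySem.List.pyIdx?, innerA, misma_dir]
  rw [loopA]
  norm_num [PySem.List.pyGet?, PySem.List.pyIdx?, innerA, misma_dir]
  rw [loopA]
  norm_num
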